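-- pv_equiv track=rewrite | github.com/zalmanimrecords-stack/ZalmanimAI | apps/server/app/services/release_link_discovery.py | best_release_link
-- ===== SOURCE A (Python) =====
-- LINKTREE_PLATFORM_PRIORITY = (
--     "spotify",
--     "apple_music",
--     "youtube",
--     "beatport",
--     "bandcamp",
--     "deezer",
--     "tidal",
--     "amazon_music",
--     "soundcloud",
-- )
--
-- def best_release_link(platform_links: dict[str, str]) -> str | None:
--     for platform in LINKTREE_PLATFORM_PRIORITY:
--         if platform_links.get(platform):
--             return platform_links[platform]
--     for _, url in platform_links.items():
--         if url:
--             return url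
--     return None
-- ===== SOURCE B (Python) =====
-- LINKTREE_PLATFORM_PRIORITY = (
--     "spotify",
--     "apple_music",
--     "youtube",
--     "beatport",
--     "bandcamp",
--     "deezer",
--     "tidal",
--     "amazon_music",
--     "soundcloud",
-- )
--
-- def best_release_link(platform_links):
--     # Single pass: track the best (lowest-rank) truthy URL seen so far;
--     # unknown platforms share rank n, so the first of them wins ties.
--     rank = {p: i for i, p in enumerate(LINKTREE_PLATFORM_PRIORITY)}
--     n = len(LINKTREE_PLATFORM_PRIORITY)
--     best_rank = n + 1
--     best_url = None
--     for k, v in platform_links.items():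
--         if v:
--             r = rank.get(k, n)
--             if r < best_rank:
--                 best_rank = r
--                 best_url = v
--     return best_url
-- ===== Notes on version B (the rewrite author's own statement) =====
-- stated objective: alternative
-- what changed: Replaced A's two sequential scans (one over the 9-platform priority tuple with dict lookups, then one over the dict items as fallback) by a single pass over the dict items that tracks the minimum-rank truthy URL via a precomputed rank table, with first-wins tie-breaking giving the fallback order.
import Mathlib
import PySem

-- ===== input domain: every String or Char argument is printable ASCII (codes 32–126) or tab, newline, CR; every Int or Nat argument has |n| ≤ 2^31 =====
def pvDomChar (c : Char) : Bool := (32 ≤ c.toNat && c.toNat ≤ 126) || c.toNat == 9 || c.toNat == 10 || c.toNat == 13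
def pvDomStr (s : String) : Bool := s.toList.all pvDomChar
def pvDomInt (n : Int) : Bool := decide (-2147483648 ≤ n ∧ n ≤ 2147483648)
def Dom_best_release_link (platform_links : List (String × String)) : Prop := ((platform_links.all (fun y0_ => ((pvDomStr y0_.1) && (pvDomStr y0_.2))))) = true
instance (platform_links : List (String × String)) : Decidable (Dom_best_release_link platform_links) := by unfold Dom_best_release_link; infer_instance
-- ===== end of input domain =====

-- B replaces A's two sequential scans (priority tuple with dict lookups, then a dict
-- fallback scan) by a single pass over the items tracking the minimum-rank truthy URL.

-- ===== PORT A =====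
def pvPriority : List String :=
  ["spotify", "apple_music", "youtube", "beatport", "bandcamp",
   "deezer", "tidal", "amazon_music", "soundcloud"]

-- 'for platform in LINKTREE_PLATFORM_PRIORITY: if platform_links.get(platform): return platform_links[platform]'
def pvALoop1 (d : PySem.Dict String String) : List String → Option String
  | [] => none
  | p :: rest =>
    match d.get? p with
    | some v => if v ≠ "" then some v else pvALoop1 d rest
    | none => pvALoop1 d rest

-- 'for _, url in platform_links.items(): if url: return url'
def pvALoop2 : List (String × String) → Option String
  | [] => none
  | kv :: rest => if kv.2 ≠ "" then some kv.2 else pvALoop2 rest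

def best_release_link (platform_links : List (String × String)) : Option String :=
  let d := PySem.Dict.ofList platform_links
  match pvALoop1 d pvPriority with
  | some v => some v
  | none => pvALoop2 d.items

-- ===== PORT B =====
-- rank = {p: i for i, p in enumerate(LINKTREE_PLATFORM_PRIORITY)}
def pvRankDict : PySem.Dict String Int :=
  PySem.Dict.ofList ((PySem.List.enumerate pvPriority).map (fun ip => (ip.2, ip.1)))

def best_release_link_alt (platform_links : List (String × String)) : Option String :=
  let d := PySem.Dict.ofList platform_links
  let n : Int := (pvPriority.length : Int)
  (d.items.foldl
    (fun (st : Int × Option String) kv =>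
      if kv.2 ≠ "" then
        let r := pvRankDict.getD kv.1 n
        if r < st.1 then (r, some kv.2) else st
      else st)
    (n + 1, none)).2

-- ===== PRECONDITION & SPEC =====
def Spec_best_release_link (platform_links : List (String × String)) (out : Option String) : Prop := out = best_release_link_alt platform_links
instance (platform_links : List (String × String)) (out : Option String) : Decidable (Spec_best_release_link platform_links out) := by unfold Spec_best_release_link; infer_instance

-- ===== CLAIM (what is proved, stated in full; the proofs are below) =====
def Claim_equal_best_release_link : Prop := ∀ (platform_links : List (String × String)), Dom_best_release_link platform_links → Spec_best_release_link platform_links (best_release_link platform_links)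

-- ===== LEMMAS AND PROOFS =====

-- rank of a key: index in the priority list, 9 for unknown platforms
def pvR (k : String) : Int := pvRankDict.getD k 9

-- the body of B's fold, with the constants evaluated (definitionally equal to the port's lambda)
def pvStep (st : Int × Option String) (kv : String × String) : Int × Option String :=
  if kv.2 ≠ "" then
    if pvR kv.1 < st.1 then (pvR kv.1, some kv.2) else st
  else st

-- first truthy item with rank j
def pvFirstAt (l : List (String × String)) (j : Int) : Option String :=
  (l.find? (fun kv => kv.2 ≠ "" && pvR kv.1 == j)).map (·.2)

-- the running minimum rank (first component of B's fold)
def pvMin (l : List (String × String)) (b : Int) : Int :=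
  l.foldl (fun a kv => if kv.2 ≠ "" ∧ pvR kv.1 < a then pvR kv.1 else a) b

-- the per-platform test of A's first loop
def pvSlot (d : PySem.Dict String String) (k : String) : Option String :=
  match d.get? k with
  | some v => if v ≠ "" then some v else none
  | none => none

lemma pvRankDict_eq : pvRankDict =
    ((((((((PySem.Dict.empty.insert "spotify" (0 : Int)).insert "apple_music" 1).insert
      "youtube" 2).insert "beatport" 3).insert "bandcamp" 4).insert "deezer" 5).insert
      "tidal" 6).insert "amazon_music" 7).insert "soundcloud" 8 := by rfl

lemma pvR_eq (k : String) : pvR k =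
    if k = "spotify" then 0 else if k = "apple_music" then 1 else if k = "youtube" then 2
    else if k = "beatport" then 3 else if k = "bandcamp" then 4 else if k = "deezer" then 5
    else if k = "tidal" then 6 else if k = "amazon_music" then 7 else if k = "soundcloud" then 8
    else 9 := by
  rw [pvR, pvRankDict_eq]
  simp only [PySem.Dict.getD_insert, PySem.Dict.getD_empty]
  split_ifs <;> simp_all

lemma pvR_nonneg (k : String) : 0 ≤ pvR k := by
  rw [pvR_eq]; split_ifs <;> norm_num

lemma pvR_le (k : String) : pvR k ≤ 9 := by
  rw [pvR_eq]; split_ifs <;> norm_num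

lemma pvPred0 : (fun kv : String × String => kv.2 ≠ "" && kv.1 == "spotify")
    = (fun kv : String × String => kv.2 ≠ "" && pvR kv.1 == (0 : Int)) := by
  funext kv; congr 1; rw [Bool.eq_iff_iff]; simp only [beq_iff_eq]; rw [pvR_eq]
  split_ifs <;> simp_all

lemma pvPred1 : (fun kv : String × String => kv.2 ≠ "" && kv.1 == "apple_music")
    = (fun kv : String × String => kv.2 ≠ "" && pvR kv.1 == (1 : Int)) := by
  funext kv; congr 1; rw [Bool.eq_iff_iff]; simp only [beq_iff_eq]; rw [pvR_eq]
  split_ifs <;> simp_all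

lemma pvPred2 : (fun kv : String × String => kv.2 ≠ "" && kv.1 == "youtube")
    = (fun kv : String × String => kv.2 ≠ "" && pvR kv.1 == (2 : Int)) := by
  funext kv; congr 1; rw [Bool.eq_iff_iff]; simp only [beq_iff_eq]; rw [pvR_eq]
  split_ifs <;> simp_all

lemma pvPred3 : (fun kv : String × String => kv.2 ≠ "" && kv.1 == "beatport")
    = (fun kv : String × String => kv.2 ≠ "" && pvR kv.1 == (3 : Int)) := by
  funext kv; congr 1; rw [Bool.eq_iff_iff]; simp only [beq_iff_eq]; rw [pvR_eq]
  split_ifs <;> simp_all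

lemma pvPred4 : (fun kv : String × String => kv.2 ≠ "" && kv.1 == "bandcamp")
    = (fun kv : String × String => kv.2 ≠ "" && pvR kv.1 == (4 : Int)) := by
  funext kv; congr 1; rw [Bool.eq_iff_iff]; simp only [beq_iff_eq]; rw [pvR_eq]
  split_ifs <;> simp_all

lemma pvPred5 : (fun kv : String × String => kv.2 ≠ "" && kv.1 == "deezer")
    = (fun kv : String × String => kv.2 ≠ "" && pvR kv.1 == (5 : Int)) := by
  funext kv; congr 1; rw [Bool.eq_iff_iff]; simp only [beq_iff_eq]; rw [pvR_eq]
  split_ifs <;> simp_all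

lemma pvPred6 : (fun kv : String × String => kv.2 ≠ "" && kv.1 == "tidal")
    = (fun kv : String × String => kv.2 ≠ "" && pvR kv.1 == (6 : Int)) := by
  funext kv; congr 1; rw [Bool.eq_iff_iff]; simp only [beq_iff_eq]; rw [pvR_eq]
  split_ifs <;> simp_all

lemma pvPred7 : (fun kv : String × String => kv.2 ≠ "" && kv.1 == "amazon_music")
    = (fun kv : String × String => kv.2 ≠ "" && pvR kv.1 == (7 : Int)) := by
  funext kv; congr 1; rw [Bool.eq_iff_iff]; simp only [beq_iff_eq]; rw [pvR_eq]
  split_ifs <;> simp_all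

lemma pvPred8 : (fun kv : String × String => kv.2 ≠ "" && kv.1 == "soundcloud")
    = (fun kv : String × String => kv.2 ≠ "" && pvR kv.1 == (8 : Int)) := by
  funext kv; congr 1; rw [Bool.eq_iff_iff]; simp only [beq_iff_eq]; rw [pvR_eq]
  split_ifs <;> simp_all

lemma pvMin_le : ∀ (l : List (String × String)) (b : Int), pvMin l b ≤ b
  | [], b => le_refl b
  | kv :: rest, b => by
    simp only [pvMin, List.foldl_cons]
    split_ifs with h
    · exact le_trans (pvMin_le rest _) (le_of_lt h.2)
    · exact pvMin_le rest b

lemma pvMin_min : ∀ (l : List (String × String)) (b : Int),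
    ∀ kv ∈ l, kv.2 ≠ "" → pvMin l b ≤ pvR kv.1
  | [], _ => by simp
  | kv0 :: rest, b => by
    intro kv hm ht
    rcases List.mem_cons.1 hm with rfl | hm
    · simp only [pvMin, List.foldl_cons]
      split_ifs with h
      · exact pvMin_le rest _
      · have hnlt : ¬ pvR kv.1 < b := fun hlt => h ⟨ht, hlt⟩
        exact le_trans (pvMin_le rest b) (not_lt.1 hnlt)
    · simp only [pvMin, List.foldl_cons]
      split_ifs with h
      · exact pvMin_min rest _ kv hm ht
      · exact pvMin_min rest b kv hm ht

lemma pvMin_nonneg : ∀ (l : List (String × String)) (b : Int), 0 ≤ b → 0 ≤ pvMin l b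
  | [], _, hb => hb
  | kv :: rest, b, hb => by
    simp only [pvMin, List.foldl_cons]
    split_ifs with h
    · exact pvMin_nonneg rest _ (pvR_nonneg _)
    · exact pvMin_nonneg rest b hb

lemma pvMin_achieved : ∀ (l : List (String × String)) (b : Int),
    pvMin l b = b ∨ ∃ kv ∈ l, kv.2 ≠ "" ∧ pvR kv.1 = pvMin l b
  | [], _ => Or.inl rfl
  | kv :: rest, b => by
    by_cases h : kv.2 ≠ "" ∧ pvR kv.1 < b
    · have h2 : pvMin (kv :: rest) b = pvMin rest (pvR kv.1) := by
        simp only [pvMin, List.foldl_cons, if_pos h]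
      rcases pvMin_achieved rest (pvR kv.1) with heq | ⟨kv', hm, ht, hr⟩
      · exact Or.inr ⟨kv, by simp, h.1, by rw [h2, heq]⟩
      · exact Or.inr ⟨kv', List.mem_cons_of_mem _ hm, ht, by rw [h2]; exact hr⟩
    · have h2 : pvMin (kv :: rest) b = pvMin rest b := by
        simp only [pvMin, List.foldl_cons, if_neg h]
      rcases pvMin_achieved rest b with heq | ⟨kv', hm, ht, hr⟩
      · exact Or.inl (by rw [h2, heq])
      · exact Or.inr ⟨kv', List.mem_cons_of_mem _ hm, ht, by rw [h2]; exact hr⟩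

lemma pvMin_eq_top (l : List (String × String)) :
    pvMin l 10 = 10 ↔ ∀ kv ∈ l, kv.2 = "" := by
  constructor
  · intro h kv hm
    by_contra ht
    have h1 := pvMin_min l 10 kv hm ht
    have h2 := pvR_le kv.1
    omega
  · intro h
    induction l with
    | nil => rfl
    | cons kv rest ih =>
      have hkv : kv.2 = "" := h kv (by simp)
      have hstep : pvMin (kv :: rest) 10 = pvMin rest 10 := by
        simp only [pvMin, List.foldl_cons]
        rw [if_neg (by simp [hkv])]
      rw [hstep]
      exact ih (fun kv hm => h kv (List.mem_cons_of_mem _ hm))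

-- B's fold computes the running minimum and the first truthy item achieving it
lemma pvFold_spec : ∀ (l : List (String × String)) (b : Int) (u : Option String),
    l.foldl pvStep (b, u) = (pvMin l b, if pvMin l b = b then u else pvFirstAt l (pvMin l b))
  | [], b, u => by simp [pvMin]
  | kv :: rest, b, u => by
    rw [List.foldl_cons]
    by_cases ht : kv.2 = ""
    · have h1 : pvStep (b, u) kv = (b, u) := by simp [pvStep, ht]
      have h2 : pvMin (kv :: rest) b = pvMin rest b := by
        simp only [pvMin, List.foldl_cons]; rw [if_neg (by simp [ht])]
      rw [h1, pvFold_spec rest b u, h2]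
      by_cases hMb : pvMin rest b = b
      · rw [if_pos hMb, if_pos hMb]
      · rw [if_neg hMb, if_neg hMb]
        have hF : pvFirstAt (kv :: rest) (pvMin rest b) = pvFirstAt rest (pvMin rest b) := by
          unfold pvFirstAt
          rw [List.find?_cons_of_neg (by simp [ht])]
        rw [hF]
    · by_cases hlt : pvR kv.1 < b
      · have h1 : pvStep (b, u) kv = (pvR kv.1, some kv.2) := by simp [pvStep, ht, hlt]
        have h2 : pvMin (kv :: rest) b = pvMin rest (pvR kv.1) := by
          simp only [pvMin, List.foldl_cons]; rw [if_pos ⟨ht, hlt⟩]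
        rw [h1, pvFold_spec rest _ _, h2]
        have hMle : pvMin rest (pvR kv.1) ≤ pvR kv.1 := pvMin_le rest _
        have hMb : pvMin rest (pvR kv.1) ≠ b := by omega
        rw [if_neg hMb]
        by_cases hr : pvMin rest (pvR kv.1) = pvR kv.1
        · rw [if_pos hr]
          have hF : pvFirstAt (kv :: rest) (pvMin rest (pvR kv.1)) = some kv.2 := by
            unfold pvFirstAt
            rw [List.find?_cons_of_pos (by simp [ht, hr])]
            rfl
          rw [hF]
        · rw [if_neg hr]
          have hF : pvFirstAt (kv :: rest) (pvMin rest (pvR kv.1))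
              = pvFirstAt rest (pvMin rest (pvR kv.1)) := by
            unfold pvFirstAt
            rw [List.find?_cons_of_neg]
            simp only [Bool.and_eq_true, decide_eq_true_eq, beq_iff_eq, not_and]
            exact fun _ h => hr h.symm
          rw [hF]
      · have h1 : pvStep (b, u) kv = (b, u) := by simp [pvStep, ht, hlt]
        have h2 : pvMin (kv :: rest) b = pvMin rest b := by
          simp only [pvMin, List.foldl_cons]
          rw [if_neg (fun hc => hlt hc.2)]
        rw [h1, pvFold_spec rest b u, h2]
        by_cases hMb : pvMin rest b = b
        · rw [if_pos hMb, if_pos hMb]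
        · rw [if_neg hMb, if_neg hMb]
          have hMle : pvMin rest b ≤ b := pvMin_le rest b
          have hF : pvFirstAt (kv :: rest) (pvMin rest b) = pvFirstAt rest (pvMin rest b) := by
            unfold pvFirstAt
            rw [List.find?_cons_of_neg]
            simp only [Bool.and_eq_true, decide_eq_true_eq, beq_iff_eq, not_and]
            intro _ h
            omega
          rw [hF]

-- A's fallback loop = first truthy at rank 9, when every truthy item has rank 9
lemma pvLoop2_eq : ∀ (l : List (String × String)),
    (∀ kv ∈ l, kv.2 ≠ "" → pvR kv.1 = 9) → pvALoop2 l = pvFirstAt l 9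
  | [], _ => rfl
  | kv :: rest, h => by
    by_cases ht : kv.2 = ""
    · have h1 : pvALoop2 (kv :: rest) = pvALoop2 rest := by simp [pvALoop2, ht]
      have h2 : pvFirstAt (kv :: rest) 9 = pvFirstAt rest 9 := by
        unfold pvFirstAt
        rw [List.find?_cons_of_neg (by simp [ht])]
      rw [h1, h2]
      exact pvLoop2_eq rest (fun kv hm => h kv (List.mem_cons_of_mem _ hm))
    · have h9 : pvR kv.1 = 9 := h kv (by simp) ht
      have h1 : pvALoop2 (kv :: rest) = some kv.2 := by simp [pvALoop2, ht]
      have h2 : pvFirstAt (kv :: rest) 9 = some kv.2 := by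
        unfold pvFirstAt
        rw [List.find?_cons_of_pos (by simp [ht, h9])]
        rfl
      rw [h1, h2]

-- A's per-platform test = find? on the items (keys nodup)
lemma pvGet_find : ∀ (its : List (String × String)),
    (its.map (fun kv => kv.1)).Nodup → ∀ (k : String),
    (match (PySem.Dict.mk its).get? k with
     | some v => if v ≠ "" then some v else none
     | none => none) =
    (its.find? (fun kv => kv.2 ≠ "" && kv.1 == k)).map (·.2)
  | [], _, k => by
    have hg : (PySem.Dict.mk ([] : List (String × String))).get? k = none := rfl
    rw [hg]
    rfl
  | kv :: rest, hnd, k => by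
    have hnd' : (rest.map (fun kv => kv.1)).Nodup := (List.nodup_cons.mp (by simpa using hnd)).2
    have hne : kv.1 ∉ rest.map (fun kv => kv.1) := (List.nodup_cons.mp (by simpa using hnd)).1
    rw [PySem.Dict.get?_mk_cons]
    by_cases hk : kv.1 = k
    · rw [if_pos (by simpa using hk)]
      by_cases ht : kv.2 = ""
      · show (if kv.2 ≠ "" then some kv.2 else none) = _
        rw [if_neg (fun hc => hc ht)]
        have hfind : rest.find? (fun kv' => kv'.2 ≠ "" && kv'.1 == k) = none := by
          rw [List.find?_eq_none]
          intro p hp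
          simp only [Bool.and_eq_true, decide_eq_true_eq, beq_iff_eq, not_and]
          intro _ hpk
          have hpe : p.1 = kv.1 := by rw [hpk, hk]
          exact hne (hpe ▸ List.mem_map_of_mem hp)
        rw [List.find?_cons_of_neg (by simp [ht]), hfind]
        rfl
      · show (if kv.2 ≠ "" then some kv.2 else none) = _
        rw [if_pos ht]
        rw [List.find?_cons_of_pos (by simp [ht, hk])]
        rfl
    · rw [if_neg (by simpa using hk)]
      rw [List.find?_cons_of_neg (by simp [hk])]
      exact pvGet_find rest hnd' k

lemma pvSlot_items (d : PySem.Dict String String)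
    (hnd : (d.items.map (fun kv => kv.1)).Nodup) (k : String) :
    pvSlot d k = (d.items.find? (fun kv => kv.2 ≠ "" && kv.1 == k)).map (·.2) :=
  pvGet_find d.items hnd k

lemma pvALoop1_nil (d : PySem.Dict String String) : pvALoop1 d [] = none := rfl

lemma pvALoop1_cons (d : PySem.Dict String String) (p : String) (rest : List String) :
    pvALoop1 d (p :: rest) =
      (match pvSlot d p with
       | some v => some v
       | none => pvALoop1 d rest) := by
  cases hg : d.get? p with
  | none => simp [pvALoop1, pvSlot, hg]
  | some v =>
    by_cases hv : v = "" <;> simp [pvALoop1, pvSlot, hg, hv]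

-- ===== VERDICT (by name: the statement is the Claim_ definition above) =====
theorem best_release_link_spec : Claim_equal_best_release_link := by
  intro pls _hdom
  show best_release_link pls = best_release_link_alt pls
  have hnd : (((PySem.Dict.ofList pls).items).map (fun kv => kv.1)).Nodup := by
    have h := PySem.Dict.nodup_keys_ofList (ps := pls)
    simpa [PySem.Dict.keys] using h
  have hB : best_release_link_alt pls =
      (if pvMin ((PySem.Dict.ofList pls).items) 10 = 10 then none
       else pvFirstAt ((PySem.Dict.ofList pls).items) (pvMin ((PySem.Dict.ofList pls).items) 10)) := by
    have h0 : best_release_link_alt pls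
        = (((PySem.Dict.ofList pls).items).foldl pvStep (10, none)).2 := rfl
    rw [h0, pvFold_spec]
  rw [hB]
  have hs0 : pvSlot (PySem.Dict.ofList pls) "spotify"
      = pvFirstAt ((PySem.Dict.ofList pls).items) 0 := by
    rw [pvSlot_items _ hnd, pvPred0]; rfl
  have hs1 : pvSlot (PySem.Dict.ofList pls) "apple_music"
      = pvFirstAt ((PySem.Dict.ofList pls).items) 1 := by
    rw [pvSlot_items _ hnd, pvPred1]; rfl
  have hs2 : pvSlot (PySem.Dict.ofList pls) "youtube"
      = pvFirstAt ((PySem.Dict.ofList pls).items) 2 := by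
    rw [pvSlot_items _ hnd, pvPred2]; rfl
  have hs3 : pvSlot (PySem.Dict.ofList pls) "beatport"
      = pvFirstAt ((PySem.Dict.ofList pls).items) 3 := by
    rw [pvSlot_items _ hnd, pvPred3]; rfl
  have hs4 : pvSlot (PySem.Dict.ofList pls) "bandcamp"
      = pvFirstAt ((PySem.Dict.ofList pls).items) 4 := by
    rw [pvSlot_items _ hnd, pvPred4]; rfl
  have hs5 : pvSlot (PySem.Dict.ofList pls) "deezer"
      = pvFirstAt ((PySem.Dict.ofList pls).items) 5 := by
    rw [pvSlot_items _ hnd, pvPred5]; rfl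
  have hs6 : pvSlot (PySem.Dict.ofList pls) "tidal"
      = pvFirstAt ((PySem.Dict.ofList pls).items) 6 := by
    rw [pvSlot_items _ hnd, pvPred6]; rfl
  have hs7 : pvSlot (PySem.Dict.ofList pls) "amazon_music"
      = pvFirstAt ((PySem.Dict.ofList pls).items) 7 := by
    rw [pvSlot_items _ hnd, pvPred7]; rfl
  have hs8 : pvSlot (PySem.Dict.ofList pls) "soundcloud"
      = pvFirstAt ((PySem.Dict.ofList pls).items) 8 := by
    rw [pvSlot_items _ hnd, pvPred8]; rfl
  simp only [best_release_link]
  rw [show pvPriority = ["spotify", "apple_music", "youtube", "beatport", "bandcamp",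
    "deezer", "tidal", "amazon_music", "soundcloud"] from rfl]
  simp only [pvALoop1_cons, pvALoop1_nil]
  rw [hs0, hs1, hs2, hs3, hs4, hs5, hs6, hs7, hs8]
  obtain ⟨M, hM⟩ : ∃ M, M = pvMin ((PySem.Dict.ofList pls).items) 10 := ⟨_, rfl⟩
  rw [← hM]
  have hub : M ≤ 10 := by rw [hM]; exact pvMin_le _ _
  have hlb : 0 ≤ M := by rw [hM]; exact pvMin_nonneg _ _ (by norm_num)
  have hmin : ∀ kv ∈ (PySem.Dict.ofList pls).items, kv.2 ≠ "" → M ≤ pvR kv.1 := by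
    intro kv hm ht; rw [hM]; exact pvMin_min _ _ kv hm ht
  have hach : M = 10 ∨ ∃ kv ∈ (PySem.Dict.ofList pls).items, kv.2 ≠ "" ∧ pvR kv.1 = M := by
    rw [hM]; exact pvMin_achieved _ _
  have hnone : ∀ j : Int, j < M → pvFirstAt ((PySem.Dict.ofList pls).items) j = none := by
    intro j hj
    have hfind : ((PySem.Dict.ofList pls).items).find?
        (fun kv => kv.2 ≠ "" && pvR kv.1 == j) = none := by
      rw [List.find?_eq_none]
      intro kv hm hp
      rw [Bool.and_eq_true, decide_eq_true_eq, beq_iff_eq] at hp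
      obtain ⟨ht, hr⟩ := hp
      have hle := hmin kv hm ht
      omega
    unfold pvFirstAt
    rw [hfind]
    rfl
  have hwit : ∀ c : Int, c ≠ 10 → (M = c) →
      ∃ v, pvFirstAt ((PySem.Dict.ofList pls).items) c = some v := by
    intro c hc hMc
    obtain ⟨kv, hmem, ht, hr⟩ : ∃ kv ∈ (PySem.Dict.ofList pls).items, kv.2 ≠ "" ∧ pvR kv.1 = c := by
      rcases hach with h | h
      · exact absurd (hMc ▸ h) hc
      · exact hMc ▸ h
    have hS : (((PySem.Dict.ofList pls).items).find?
        (fun kv => kv.2 ≠ "" && pvR kv.1 == c)).isSome := by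
      rw [List.find?_isSome]
      exact ⟨kv, hmem, by simp [ht, hr]⟩
    obtain ⟨p, hp⟩ := Option.isSome_iff_exists.mp hS
    exact ⟨p.2, by unfold pvFirstAt; rw [hp]; rfl⟩
  interval_cases M
  · obtain ⟨v, hv⟩ := hwit 0 (by norm_num) rfl
    rw [hv]; simp
  · obtain ⟨v, hv⟩ := hwit 1 (by norm_num) rfl
    rw [hnone 0 (by norm_num), hv]; simp
  · obtain ⟨v, hv⟩ := hwit 2 (by norm_num) rfl
    rw [hnone 0 (by norm_num), hnone 1 (by norm_num), hv]; simp
  · obtain ⟨v, hv⟩ := hwit 3 (by norm_num) rfl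
    rw [hnone 0 (by norm_num), hnone 1 (by norm_num), hnone 2 (by norm_num), hv]; simp
  · obtain ⟨v, hv⟩ := hwit 4 (by norm_num) rfl
    rw [hnone 0 (by norm_num), hnone 1 (by norm_num), hnone 2 (by norm_num),
      hnone 3 (by norm_num), hv]; simp
  · obtain ⟨v, hv⟩ := hwit 5 (by norm_num) rfl
    rw [hnone 0 (by norm_num), hnone 1 (by norm_num), hnone 2 (by norm_num),
      hnone 3 (by norm_num), hnone 4 (by norm_num), hv]; simp
  · obtain ⟨v, hv⟩ := hwit 6 (by norm_num) rfl
    rw [hnone 0 (by norm_num), hnone 1 (by norm_num), hnone 2 (by norm_num),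
      hnone 3 (by norm_num), hnone 4 (by norm_num), hnone 5 (by norm_num), hv]; simp
  · obtain ⟨v, hv⟩ := hwit 7 (by norm_num) rfl
    rw [hnone 0 (by norm_num), hnone 1 (by norm_num), hnone 2 (by norm_num),
      hnone 3 (by norm_num), hnone 4 (by norm_num), hnone 5 (by norm_num),
      hnone 6 (by norm_num), hv]; simp
  · obtain ⟨v, hv⟩ := hwit 8 (by norm_num) rfl
    rw [hnone 0 (by norm_num), hnone 1 (by norm_num), hnone 2 (by norm_num),
      hnone 3 (by norm_num), hnone 4 (by norm_num), hnone 5 (by norm_num),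
      hnone 6 (by norm_num), hnone 7 (by norm_num), hv]; simp
  · rw [hnone 0 (by norm_num), hnone 1 (by norm_num), hnone 2 (by norm_num),
      hnone 3 (by norm_num), hnone 4 (by norm_num), hnone 5 (by norm_num),
      hnone 6 (by norm_num), hnone 7 (by norm_num), hnone 8 (by norm_num)]
    have hall9 : ∀ kv ∈ (PySem.Dict.ofList pls).items, kv.2 ≠ "" → pvR kv.1 = 9 :=
      fun kv hm ht => le_antisymm (pvR_le kv.1) (hmin kv hm ht)
    rw [pvLoop2_eq _ hall9]
    simp
  · have hfalsy : ∀ kv ∈ (PySem.Dict.ofList pls).items, kv.2 = "" :=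
      (pvMin_eq_top _).mp hM.symm
    have hn : ∀ j : Int, pvFirstAt ((PySem.Dict.ofList pls).items) j = none := by
      intro j
      have hfind : ((PySem.Dict.ofList pls).items).find?
          (fun kv => kv.2 ≠ "" && pvR kv.1 == j) = none := by
        rw [List.find?_eq_none]
        intro kv hm hp
        rw [Bool.and_eq_true, decide_eq_true_eq] at hp
        exact hp.1 (hfalsy kv hm)
      unfold pvFirstAt
      rw [hfind]
      rfl
    rw [hn 0, hn 1, hn 2, hn 3, hn 4, hn 5, hn 6, hn 7, hn 8]
    have hall9 : ∀ kv ∈ (PySem.Dict.ofList pls).items, kv.2 ≠ "" → pvR kv.1 = 9 :=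
      fun kv hm ht => absurd (hfalsy kv hm) ht
    rw [pvLoop2_eq _ hall9, hn 9]
    simp
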